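-- pv_equiv track=rewrite | github.com/AdamBouzid0/codecamp_fork | codes/core.py | set_labels
-- ===== SOURCE A (Python) =====
-- def parse_tasks(tasks):
--     """
--     Parse les lignes brutes du fichier en une liste structurée de tâches.
--
--     Args:
--         tasks (list): Liste des lignes lues depuis le fichier de tâches
--
--     Returns:
--         list: Liste de tuples (id: int, description: str, labels: list) représentant les tâches
--
--     Note:
--         - Ignore les lignes vides
--         - Ignore les lignes mal formatées (sans ';' ou avec ID non numérique)
--         - Format attendu: "ID;Description" ou "ID;Description;label1,label2,..."
--         - Rétrocompatible avec l'ancien format (sans labels)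
--
--     Example:
--         >>> parse_tasks(["1;Faire les courses;urgent,personnel", "2;Réviser"])
--         [(1, 'Faire les courses', ['urgent', 'personnel']), (2, 'Réviser', [])]
--     """
--     parsed_tasks = []
--     for line in tasks:
--         line = line.strip()
--         if line:  # Ignore empty lines
--             parts = line.split(";")
--             if len(parts) >= 2:
--                 try:
--                     tid = int(parts[0])
--                     description = parts[1]
--                     # Gestion des labels (nouveau format)
--                     if len(parts) >= 3 and parts[2].strip():
--                         labels = [label.strip() for label in parts[2].split(",") if label.strip()]
--                     else:
--                         labels = []
--                     parsed_tasks.append((tid, description, labels))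
--                 except ValueError:
--                     # Ignore les lignes avec un ID non numérique
--                     continue
--     return parsed_tasks
--
-- def set_labels(tasks, task_id, new_labels):
--     """
--     Remplace tous les labels d'une tâche existante.
--
--     Args:
--         tasks (list): Liste des lignes existantes du fichier de tâches
--         task_id (str|int): ID de la tâche à modifier
--         new_labels (list): Nouveaux labels pour la tâche
--
--     Returns:
--         tuple: (found: bool, updated_tasks: list)
--             - found: True si la tâche a été trouvée et modifiée, False sinon
--             - updated_tasks: Liste des tâches avec la modification appliquée
--
--     Example:
--         >>> set_labels(["1;Ma tâche;ancien"], "1", ["nouveau", "important"])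
--         (True, [(1, 'Ma tâche', ['nouveau', 'important'])])
--     """
--     try:
--         task_id = int(task_id)
--     except ValueError:
--         return False, []
--
--     parsed_tasks = parse_tasks(tasks)
--     found = False
--
--     for i, (tid, desc, labels) in enumerate(parsed_tasks):
--         if tid == task_id:
--             parsed_tasks[i] = (tid, desc, new_labels.copy())
--             found = True
--             break
--
--     return found, parsed_tasks
-- ===== SOURCE B (Python) =====
-- def set_labels(tasks, task_id, new_labels):
--     # Single fused pass: parse each line and apply the label replacement on the fly.
--     try:
--         task_id = int(task_id)
--     except ValueError:
--         return False, []
--     found = False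
--     out = []
--     for line in tasks:
--         line = line.strip()
--         if not line:
--             continue
--         parts = line.split(";")
--         if len(parts) < 2:
--             continue
--         try:
--             tid = int(parts[0])
--         except ValueError:
--             continue
--         desc = parts[1]
--         if len(parts) >= 3 and parts[2].strip():
--             labels = [label.strip() for label in parts[2].split(",") if label.strip()]
--         else:
--             labels = []
--         if not found and tid == task_id:
--             out.append((tid, desc, list(new_labels)))
--             found = True
--         else:
--             out.append((tid, desc, labels))
--     return found, out
-- ===== Notes on version B (the rewrite author's own statement) =====
-- stated objective: simpler
-- what changed: B inlines the parsing helper and fuses parse_tasks and the replacement scan into one single pass with a found flag, eliminating the separate helper and the second traversal.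
import Mathlib
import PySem

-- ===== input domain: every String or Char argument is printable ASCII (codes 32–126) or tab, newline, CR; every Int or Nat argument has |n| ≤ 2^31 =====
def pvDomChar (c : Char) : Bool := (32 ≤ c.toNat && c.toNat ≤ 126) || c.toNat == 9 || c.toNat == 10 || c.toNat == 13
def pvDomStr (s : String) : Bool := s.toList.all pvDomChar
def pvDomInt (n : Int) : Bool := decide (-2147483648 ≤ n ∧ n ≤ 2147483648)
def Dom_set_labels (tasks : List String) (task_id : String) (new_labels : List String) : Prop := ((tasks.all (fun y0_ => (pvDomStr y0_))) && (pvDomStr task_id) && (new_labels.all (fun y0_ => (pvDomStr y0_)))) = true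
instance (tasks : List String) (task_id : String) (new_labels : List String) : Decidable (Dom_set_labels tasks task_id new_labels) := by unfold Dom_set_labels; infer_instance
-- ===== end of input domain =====

-- B fuses A's parse_tasks helper and the replacement scan into one single pass with a
-- found flag (simpler decomposition, same complexity); return values proved equal everywhere.

-- ===== PORT A =====
-- shared comprehension: [label.strip() for label in p.split(",") if label.strip()]
def pvLabelsOf (p : List Char) : List String :=
  (PySem.Chars.splitOn p [',']).filterMap (fun lb =>
    let s := PySem.Chars.strip lb
    if s = [] then none else some (String.ofList s))

-- one iteration of parse_tasks' loop body: the parsed tuple, or none where the line is skipped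
def pvParseLineA (line : String) : Option (Int × String × List String) :=
  let l := PySem.Chars.strip line.toList
  if l = [] then none
  else
    let parts := PySem.Chars.splitOn l [';']
    if parts.length ≥ 2 then
      match PySem.Int.ofChars? (parts.getD 0 []) with
      | some tid =>
          let description := String.ofList (parts.getD 1 [])
          let labels :=
            if parts.length ≥ 3 ∧ PySem.Chars.strip (parts.getD 2 []) ≠ [] then
              pvLabelsOf (parts.getD 2 [])
            else []
          some (tid, description, labels)
      | none => none
    else none

def pvParseTasks (tasks : List String) : List (Int × String × List String) :=
  tasks.foldl (fun acc line =>
    match pvParseLineA line with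
    | some t => acc ++ [t]
    | none => acc) []

-- the 'for i, (tid, desc, labels) in enumerate(...)' loop with in-place update and break
def pvSetFirst (task_id : Int) (new_labels : List String) :
    List (Int × String × List String) → Bool × List (Int × String × List String)
  | [] => (false, [])
  | (tid, desc, labels) :: rest =>
      if tid = task_id then (true, (tid, desc, new_labels) :: rest)
      else
        let r := pvSetFirst task_id new_labels rest
        (r.1, (tid, desc, labels) :: r.2)

def set_labels (tasks : List String) (task_id : String) (new_labels : List String) :
    Bool × (List (Int × String × List String)) :=
  match PySem.Int.ofChars? task_id.toList with
  | none => (false, [])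
  | some tid => pvSetFirst tid new_labels (pvParseTasks tasks)

-- ===== PORT B =====
def set_labels_alt (tasks : List String) (task_id : String) (new_labels : List String) :
    Bool × (List (Int × String × List String)) :=
  match PySem.Int.ofChars? task_id.toList with
  | none => (false, [])
  | some tid =>
    tasks.foldl (fun (st : Bool × List (Int × String × List String)) line =>
      let l := PySem.Chars.strip line.toList
      if l = [] then st
      else
        let parts := PySem.Chars.splitOn l [';']
        if parts.length < 2 then st
        else
          match PySem.Int.ofChars? (parts.getD 0 []) with
          | none => st
          | some cur =>
            let desc := String.ofList (parts.getD 1 [])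
            let labels :=
              if parts.length ≥ 3 ∧ PySem.Chars.strip (parts.getD 2 []) ≠ [] then
                pvLabelsOf (parts.getD 2 [])
              else []
            if !st.1 && cur == tid then (true, st.2 ++ [(cur, desc, new_labels)])
            else (st.1, st.2 ++ [(cur, desc, labels)]))
      (false, [])

-- ===== PRECONDITION & SPEC =====
def Spec_set_labels (tasks : List String) (task_id : String) (new_labels : List String) (out : Bool × (List (Int × String × List String))) : Prop := out = set_labels_alt tasks task_id new_labels
instance (tasks : List String) (task_id : String) (new_labels : List String) (out : Bool × (List (Int × String × List String))) : Decidable (Spec_set_labels tasks task_id new_labels out) := by unfold Spec_set_labels; infer_instance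

-- ===== CLAIM (what is proved, stated in full; the proofs are below) =====
def Claim_equal_set_labels : Prop := ∀ (tasks : List String) (task_id : String) (new_labels : List String), Dom_set_labels tasks task_id new_labels → Spec_set_labels tasks task_id new_labels (set_labels tasks task_id new_labels)

-- ===== LEMMAS AND PROOFS =====

-- proof-side name for B's loop body (definitionally B's lambda)
def pvStep (tid : Int) (nl : List String)
    (st : Bool × List (Int × String × List String)) (line : String) :
    Bool × List (Int × String × List String) :=
  let l := PySem.Chars.strip line.toList
  if l = [] then st
  else
    let parts := PySem.Chars.splitOn l [';']
    if parts.length < 2 then st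
    else
      match PySem.Int.ofChars? (parts.getD 0 []) with
      | none => st
      | some cur =>
        let desc := String.ofList (parts.getD 1 [])
        let labels :=
          if parts.length ≥ 3 ∧ PySem.Chars.strip (parts.getD 2 []) ≠ [] then
            pvLabelsOf (parts.getD 2 [])
          else []
        if !st.1 && cur == tid then (true, st.2 ++ [(cur, desc, nl)])
        else (st.1, st.2 ++ [(cur, desc, labels)])

theorem pvAlt_eq (tasks : List String) (task_id : String) (nl : List String) :
    set_labels_alt tasks task_id nl =
    (match PySem.Int.ofChars? task_id.toList with
     | none => (false, [])
     | some tid => tasks.foldl (pvStep tid nl) (false, [])) := rfl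

-- A's parse loop from any accumulator is the accumulator ++ a filterMap
theorem pvParseTasks_foldl (ts : List String) (acc : List (Int × String × List String)) :
    ts.foldl (fun acc line =>
      match pvParseLineA line with
      | some t => acc ++ [t]
      | none => acc) acc = acc ++ ts.filterMap pvParseLineA := by
  induction ts generalizing acc with
  | nil => simp
  | cons l ts ih =>
      simp only [List.foldl_cons, List.filterMap_cons]
      cases pvParseLineA l with
      | none => simp [ih]
      | some t => simp [ih]

-- B's loop body, expressed through A's per-line parse
theorem pvStep_eq (tid : Int) (nl : List String)
    (st : Bool × List (Int × String × List String)) (line : String) :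
    pvStep tid nl st line =
    (match pvParseLineA line with
     | none => st
     | some x =>
         if !st.1 && x.1 == tid then (true, st.2 ++ [(x.1, x.2.1, nl)])
         else (st.1, st.2 ++ [(x.1, x.2.1, x.2.2)])) := by
  unfold pvStep pvParseLineA
  by_cases h1 : PySem.Chars.strip line.toList = []
  · rw [if_pos h1, if_pos h1]
  · rw [if_neg h1, if_neg h1]
    by_cases h2 : (PySem.Chars.splitOn (PySem.Chars.strip line.toList) [';']).length ≥ 2
    · rw [if_neg (by omega), if_pos h2]
      cases PySem.Int.ofChars?
          ((PySem.Chars.splitOn (PySem.Chars.strip line.toList) [';']).getD 0 []) <;> rfl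
    · rw [if_pos (by omega), if_neg h2]

-- the main invariant of B's fused loop
theorem pvMain (tid : Int) (nl : List String) (ts : List String) :
    ∀ st : Bool × List (Int × String × List String),
    ts.foldl (pvStep tid nl) st =
    (if st.1 then (true, st.2 ++ ts.filterMap pvParseLineA)
     else ((pvSetFirst tid nl (ts.filterMap pvParseLineA)).1,
           st.2 ++ (pvSetFirst tid nl (ts.filterMap pvParseLineA)).2)) := by
  induction ts with
  | nil =>
      intro st
      cases st with
      | mk f o => cases f <;> simp [pvSetFirst]
  | cons l ts ih =>
      intro st
      rw [List.foldl_cons, pvStep_eq tid nl st l]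
      cases hp : pvParseLineA l with
      | none => rw [List.filterMap_cons_none hp, ih]
      | some t =>
          obtain ⟨i, d, lb⟩ := t
          rw [List.filterMap_cons_some hp]
          cases hf : st.1 with
          | true =>
              simp only [Bool.not_true, Bool.false_and, Bool.false_eq_true, if_false]
              rw [ih]
              simp [List.append_assoc]
          | false =>
              simp only [Bool.not_false, Bool.true_and]
              by_cases hit : i = tid
              · subst hit
                simp only [beq_self_eq_true, if_true]
                rw [ih]
                simp [pvSetFirst]
              · rw [if_neg (by simpa using hit), ih]
                simp [pvSetFirst, hit, List.append_assoc]

-- ===== VERDICT (by name: the statement is the Claim_ definition above) =====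
theorem set_labels_spec : Claim_equal_set_labels := by
  intro tasks task_id new_labels _
  unfold Spec_set_labels
  rw [pvAlt_eq]
  unfold set_labels
  cases PySem.Int.ofChars? task_id.toList with
  | none => rfl
  | some tid =>
      simp only []
      rw [pvMain tid new_labels tasks (false, [])]
      unfold pvParseTasks
      rw [pvParseTasks_foldl]
      simp
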